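-- pv_equiv track=rewrite | github.com/soundreaper/CS-1.3-Core-Data-Structures | Code/word_jumble.py | vectorToInt
-- ===== SOURCE A (Python) =====
-- def vectorToInt(vector):
--     power = 0
--     num = 0
--     for i in range(0, len(vector)):
--         temp = (vector[i]*(2**power))
--         num += temp
--         power += 4
--     return num
-- ===== SOURCE B (Python) =====
-- def vectorToInt(vector):
--     num = 0
--     for d in reversed(vector):
--         num = num * 16 + d
--     return num
-- ===== Notes on version B (the rewrite author's own statement) =====
-- stated objective: faster
-- what changed: Replaces the explicit power accumulator and per-step 2**power computation with Horner's rule over the reversed vector, maintaining a single accumulator num = num*16 + d.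
import Mathlib
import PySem

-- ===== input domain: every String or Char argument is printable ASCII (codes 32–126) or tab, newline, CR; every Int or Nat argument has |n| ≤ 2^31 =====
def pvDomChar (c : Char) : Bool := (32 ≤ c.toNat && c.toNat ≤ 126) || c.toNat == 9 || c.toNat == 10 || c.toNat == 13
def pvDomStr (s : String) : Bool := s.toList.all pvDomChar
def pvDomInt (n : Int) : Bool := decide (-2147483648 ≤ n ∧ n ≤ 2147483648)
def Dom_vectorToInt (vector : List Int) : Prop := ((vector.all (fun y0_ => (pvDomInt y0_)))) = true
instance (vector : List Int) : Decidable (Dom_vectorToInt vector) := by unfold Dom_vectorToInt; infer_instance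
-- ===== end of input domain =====

-- B replaces A's power accumulator and 2**power terms with Horner's rule over the reversed vector (simpler).


-- ===== PORT A =====
-- for i in range(0, len(vector)): temp = vector[i]*(2**power); num += temp; power += 4
-- (power stays ≥ 0 throughout, so 2**power is ported as 2 ^ power.toNat)
def vectorToInt (vector : List Int) : Int :=
  (PySem.List.pyRange 0 (PySem.List.len vector) 1).foldl
    (fun (st : Int × Int) i =>
      let temp := (PySem.List.pyGetD vector i 0) * (2 ^ st.2.toNat)
      (st.1 + temp, st.2 + 4))
    (0, 0) |>.1

-- ===== PORT B =====
-- Horner's rule over the reversed vector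
def vectorToInt_alt (vector : List Int) : Int :=
  vector.reverse.foldl (fun num d => num * 16 + d) 0

-- ===== PRECONDITION & SPEC =====
def Spec_vectorToInt (vector : List Int) (out : Int) : Prop := out = vectorToInt_alt vector
instance (vector : List Int) (out : Int) : Decidable (Spec_vectorToInt vector out) := by unfold Spec_vectorToInt; infer_instance

-- ===== CLAIM (what is proved, stated in full; the proofs are below) =====
def Claim_equal_vectorToInt : Prop := ∀ (vector : List Int), Dom_vectorToInt vector → Spec_vectorToInt vector (vectorToInt vector)

-- ===== LEMMAS AND PROOFS =====
theorem vectorToInt_alt_cons (d : Int) (t : List Int) :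
    vectorToInt_alt (d :: t) = d + 16 * vectorToInt_alt t := by
  simp [vectorToInt_alt, List.reverse_cons, List.foldl_append]
  ring

theorem vectorToInt_loop (l : List Int) (num p : Int) (hp : 0 ≤ p) :
    (l.foldl (fun (st : Int × Int) d => (st.1 + d * (2 ^ st.2.toNat), st.2 + 4)) (num, p)).1
      = num + 2 ^ p.toNat * vectorToInt_alt l := by
  induction l generalizing num p with
  | nil => simp [vectorToInt_alt]
  | cons d t ih =>
    simp only [List.foldl_cons]
    rw [ih _ _ (by omega), vectorToInt_alt_cons]
    have h4 : (p + 4).toNat = p.toNat + 4 := by omega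
    rw [h4, pow_add]
    ring

-- ===== VERDICT (by name: the statement is the Claim_ definition above) =====
theorem vectorToInt_spec : Claim_equal_vectorToInt := by
  intro vector _
  show vectorToInt vector = vectorToInt_alt vector
  unfold vectorToInt
  rw [PySem.List.foldl_pyRange_zero_pyGetD vector 0
    (fun (st : Int × Int) d => (st.1 + d * (2 ^ st.2.toNat), st.2 + 4)) (0, 0)]
  rw [vectorToInt_loop vector 0 0 le_rfl]
  simp
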